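-- pv_equiv track=rewrite | github.com/BhagyaAnand/Arithmetic-Simulator | main.py | detect_base
-- ===== SOURCE A (Python) =====
-- def detect_base(num_str):
--     """Detect base of the number without prefixes"""
--     num_str = num_str.upper()
--
--     if all(ch in "01" for ch in num_str):
--         return 2  # Binary
--     elif all(ch in "01234567" for ch in num_str):
--         return 8  # Octal
--     elif all(ch in "0123456789" for ch in num_str):
--         return 10  # Decimal
--     elif all(ch in "0123456789ABCDEF" for ch in num_str):
--         return 16  # Hexadecimal
--     else:
--         raise ValueError("Invalid number format!")
-- ===== SOURCE B (Python) =====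
-- def detect_base(num_str):
--     """Detect base of the number without prefixes"""
--     m = -1
--     for ch in num_str.upper():
--         m = max(m, int(ch, 16))
--     if m <= 1:
--         return 2
--     elif m <= 7:
--         return 8
--     elif m <= 9:
--         return 10
--     else:
--         return 16
-- ===== Notes on version B (the rewrite author's own statement) =====
-- stated objective: simpler
-- what changed: Replaced up to four membership scans over literal alphabets by a single pass computing the maximum hex-digit value and choosing the base by thresholds (<=1:2, <=7:8, <=9:10, else 16).
import Mathlib
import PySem

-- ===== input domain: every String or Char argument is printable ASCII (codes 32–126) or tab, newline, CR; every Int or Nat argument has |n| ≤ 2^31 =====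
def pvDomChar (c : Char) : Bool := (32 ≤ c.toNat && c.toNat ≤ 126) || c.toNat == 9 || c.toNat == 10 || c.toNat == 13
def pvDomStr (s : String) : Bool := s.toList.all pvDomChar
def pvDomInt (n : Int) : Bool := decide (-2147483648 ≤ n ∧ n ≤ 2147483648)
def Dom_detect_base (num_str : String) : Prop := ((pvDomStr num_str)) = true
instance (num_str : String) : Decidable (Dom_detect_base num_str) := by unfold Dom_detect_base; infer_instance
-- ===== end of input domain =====

-- ===== PORT A =====
-- literal transliteration of A: upper, then cascade of all-membership tests; 0 is the
-- (unreachable under Pre_) stand-in for the ValueError branch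
def detect_base (num_str : String) : Int :=
  let s := (PySem.Str.upper num_str).toList
  if s.all (fun ch => ch ∈ "01".toList) then 2
  else if s.all (fun ch => ch ∈ "01234567".toList) then 8
  else if s.all (fun ch => ch ∈ "0123456789".toList) then 10
  else if s.all (fun ch => ch ∈ "0123456789ABCDEF".toList) then 16
  else 0  -- raise ValueError (excluded by Pre_)

-- ===== PORT B =====
-- int(ch, 16) for a single already-uppercased character; none = ValueError
def pvHexVal (ch : Char) : Option Int :=
  if 48 ≤ ch.toNat ∧ ch.toNat ≤ 57 then some ((ch.toNat : Int) - 48)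
  else if 65 ≤ ch.toNat ∧ ch.toNat ≤ 70 then some ((ch.toNat : Int) - 55)
  else none

-- the loop of B: m = max(m, int(ch,16)) over the chars; none = ValueError
def pvMaxLoop (m : Int) : List Char → Option Int
  | [] => some m
  | ch :: rest =>
    match pvHexVal ch with
    | none => none
    | some v => pvMaxLoop (max m v) rest

def detect_base_alt (num_str : String) : Int :=
  match pvMaxLoop (-1) (PySem.Str.upper num_str).toList with
  | none => 0  -- raise ValueError (excluded by Pre_)
  | some m =>
    if m ≤ 1 then 2
    else if m ≤ 7 then 8
    else if m ≤ 9 then 10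
    else 16

-- ===== PRECONDITION & SPEC =====
-- Pre_ excludes exactly the inputs on which A raises ValueError: some character
-- (after upper) is not a hex digit.
def Pre_detect_base (num_str : String) : Prop :=
  ((PySem.Str.upper num_str).toList.all (fun ch => ch ∈ "0123456789ABCDEF".toList)) = true
instance (num_str : String) : Decidable (Pre_detect_base num_str) := by unfold Pre_detect_base; infer_instance
def pvWitness_detect_base : String := "1A2b"
def Spec_detect_base (num_str : String) (out : Int) : Prop := out = detect_base_alt num_str
instance (num_str : String) (out : Int) : Decidable (Spec_detect_base num_str out) := by unfold Spec_detect_base; infer_instance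

-- ===== CLAIM (what is proved, stated in full; the proofs are below) =====
def Claim_equal_detect_base : Prop := ∀ (num_str : String), Dom_detect_base num_str → Pre_detect_base num_str → Spec_detect_base num_str (detect_base num_str)

-- ===== LEMMAS AND PROOFS =====

-- the hex alphabet of A's last test, as an explicit char list
def pvHexChars : List Char := ['0','1','2','3','4','5','6','7','8','9','A','B','C','D','E','F']

theorem pvHexChars_eq : "0123456789ABCDEF".toList = pvHexChars := rfl

theorem pvHexSome : ∀ ch ∈ pvHexChars, (pvHexVal ch).isSome := by
  intro ch h; fin_cases h <;> simp [pvHexVal]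

-- on hex chars, membership in each of A's alphabets is a threshold on the digit value
theorem pvMem01 : ∀ ch ∈ pvHexChars, ((ch ∈ "01".toList) ↔ (pvHexVal ch).getD 0 ≤ 1) := by
  intro ch h; fin_cases h <;> simp [pvHexVal]
theorem pvMem8 : ∀ ch ∈ pvHexChars, ((ch ∈ "01234567".toList) ↔ (pvHexVal ch).getD 0 ≤ 7) := by
  intro ch h; fin_cases h <;> simp [pvHexVal]
theorem pvMem10 : ∀ ch ∈ pvHexChars, ((ch ∈ "0123456789".toList) ↔ (pvHexVal ch).getD 0 ≤ 9) := by
  intro ch h; fin_cases h <;> simp [pvHexVal]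

-- B's loop returns some M, and M ≤ k iff m ≤ k and every char's value is ≤ k
theorem pvMaxLoop_spec (l : List Char) (hl : ∀ ch ∈ l, ch ∈ pvHexChars) (m : Int) :
    ∃ M, pvMaxLoop m l = some M ∧
      ∀ k : Int, (M ≤ k ↔ m ≤ k ∧ ∀ ch ∈ l, (pvHexVal ch).getD 0 ≤ k) := by
  induction l generalizing m with
  | nil => exact ⟨m, rfl, fun k => by simp⟩
  | cons ch rest ih =>
    cases hv : pvHexVal ch with
    | none => exact absurd (pvHexSome ch (hl ch (by simp))) (by simp [hv])
    | some v =>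
      obtain ⟨M, hM, hiff⟩ := ih (fun c hc => hl c (by simp [hc])) (max m v)
      refine ⟨M, by simp [pvMaxLoop, hv, hM], fun k => ?_⟩
      rw [hiff k]
      constructor
      · rintro ⟨hmk, hall⟩
        refine ⟨le_trans (le_max_left _ _) hmk, fun c hc => ?_⟩
        rcases List.mem_cons.mp hc with h | h
        · subst h; simp only [hv, Option.getD_some]
          exact le_trans (le_max_right _ _) hmk
        · exact hall c h
      · rintro ⟨hmk, hall⟩
        refine ⟨max_le hmk ?_, fun c hc => hall c (by simp [hc])⟩
        have := hall ch (by simp)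
        simpa [hv] using this

-- each of A's all-tests equals a threshold test on B's maximum
theorem pvAll_iff (l : List Char) (hl : ∀ ch ∈ l, ch ∈ pvHexChars) (M : Int) (k : Int)
    (hk : (-1 : Int) ≤ k) (A : List Char)
    (hmem : ∀ ch ∈ pvHexChars, ((ch ∈ A) ↔ (pvHexVal ch).getD 0 ≤ k))
    (hiff : ∀ j : Int, (M ≤ j ↔ -1 ≤ j ∧ ∀ ch ∈ l, (pvHexVal ch).getD 0 ≤ j)) :
    (l.all (fun ch => decide (ch ∈ A))) = decide (M ≤ k) := by
  by_cases hMk : M ≤ k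
  · rw [decide_eq_true hMk]
    exact List.all_eq_true.mpr fun c hc =>
      decide_eq_true ((hmem c (hl c hc)).mpr (((hiff k).mp hMk).2 c hc))
  · rw [decide_eq_false hMk]
    have hex : ∃ c ∈ l, ¬ (pvHexVal c).getD 0 ≤ k := by
      by_contra hno
      push_neg at hno
      exact hMk ((hiff k).mpr ⟨hk, hno⟩)
    obtain ⟨c, hc, hv⟩ := hex
    exact List.all_eq_false.mpr ⟨c, hc, by
      simpa using fun hmemb => hv ((hmem c (hl c hc)).mp hmemb)⟩

-- ===== VERDICT (by name: the statement is the Claim_ definition above) =====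
theorem detect_base_spec : Claim_equal_detect_base := by
  intro num_str _ hpre
  unfold Pre_detect_base at hpre
  unfold Spec_detect_base detect_base detect_base_alt
  have hl : ∀ ch ∈ (PySem.Str.upper num_str).toList, ch ∈ pvHexChars :=
    fun ch hch => pvHexChars_eq ▸ of_decide_eq_true (List.all_eq_true.mp hpre ch hch)
  obtain ⟨M, hM, hiff⟩ := pvMaxLoop_spec _ hl (-1)
  have h1 := pvAll_iff _ hl M 1 (by norm_num) "01".toList pvMem01 hiff
  have h8 := pvAll_iff _ hl M 7 (by norm_num) "01234567".toList pvMem8 hiff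
  have h10 := pvAll_iff _ hl M 9 (by norm_num) "0123456789".toList pvMem10 hiff
  rw [hM]
  show (if ((PySem.Str.upper num_str).toList.all fun ch => decide (ch ∈ "01".toList)) = true then (2 : Int)
    else if ((PySem.Str.upper num_str).toList.all fun ch => decide (ch ∈ "01234567".toList)) = true then 8
    else if ((PySem.Str.upper num_str).toList.all fun ch => decide (ch ∈ "0123456789".toList)) = true then 10
    else if ((PySem.Str.upper num_str).toList.all fun ch => decide (ch ∈ "0123456789ABCDEF".toList)) = true then 16
    else 0)
    = (if M ≤ 1 then (2 : Int) else if M ≤ 7 then 8 else if M ≤ 9 then 10 else 16)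
  rw [h1, h8, h10, hpre]
  by_cases c1 : M ≤ 1 <;> by_cases c2 : M ≤ 7 <;> by_cases c3 : M ≤ 9 <;>
    simp [c1, c2, c3] <;> omega
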